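-- pv_equiv track=rewrite | github.com/HenraL/Backup-of-matieres | files/Matières/NSI/T1/cours/S0/S0BAC21-Tle-SPE-NSI_(1)/Reflexion_S0BAC21_Tle_SPE_NSI.py | retourner
-- ===== SOURCE A (Python) =====
-- def creer_pile_vide():
--  e=[]
--  return e
--
-- def empiler(list,elem):
--  list.append(elem)
--  return list
--
-- def depiler(list):
--  return list.pop(0)
--
-- def est_vide(list):
--  if len(list)==0:
--   return True
--  else:
--   return False
--
-- def hauteur_pile(P):
--  Q=creer_pile_vide()
--  n=0
--  while not(est_vide(P)==True):
--   n+=1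
--   empiler(Q,depiler(P))
--  while not(est_vide(Q)==True):
--   empiler(P,depiler(Q))
--  return n
--
-- def retourner(P,j):
--  assert j <= hauteur_pile(P), "La liste est vide"
--  Q=creer_pile_vide()
--  #R=creer_pile_vide()
--  T=creer_pile_vide()
--  rang=1#0
--  while rang<=j:
--   empiler(Q,depiler(P))
--   rang+=1
--  while not(est_vide(P)==True):
--   empiler(T,depiler(P))
--  long=hauteur_pile(Q)
--  for i in range(long-1):
--   empiler(Q,depiler(Q))
--  while not(est_vide(Q)==True):
--   empiler(P,depiler(Q))
--  while not(est_vide(T)==True):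
--   empiler(P,depiler(T))
--  return P#None
-- ===== SOURCE B (Python) =====
-- def retourner(P, j):
--     assert j <= len(P), "La liste est vide"
--     if j >= 2:
--         P[:j] = [P[j - 1]] + P[:j - 1]
--     return P
-- ===== Notes on version B (the rewrite author's own statement) =====
-- stated objective: faster
-- what changed: B replaces A's three auxiliary queues and repeated list.pop(0) dequeue/enqueue passes with a single in-place slice assignment that rotates the first j elements right by one.
import Mathlib
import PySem

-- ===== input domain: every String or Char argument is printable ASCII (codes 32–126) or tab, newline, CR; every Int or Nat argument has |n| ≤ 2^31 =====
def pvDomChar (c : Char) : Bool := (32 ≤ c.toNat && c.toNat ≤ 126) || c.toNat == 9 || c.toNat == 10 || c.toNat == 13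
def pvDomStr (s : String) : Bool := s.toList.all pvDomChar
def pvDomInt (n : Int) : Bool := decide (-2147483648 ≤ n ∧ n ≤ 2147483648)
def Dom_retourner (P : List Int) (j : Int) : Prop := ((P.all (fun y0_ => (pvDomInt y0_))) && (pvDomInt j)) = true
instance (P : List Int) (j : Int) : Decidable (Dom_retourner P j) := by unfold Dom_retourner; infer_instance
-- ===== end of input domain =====

-- B rotates the first j elements with one in-place slice assignment instead of A's three
-- auxiliary queues of repeated pop(0)/append passes (objective: faster). Both A and B mutate
-- the argument list in place and return the same object; the equivalence proved here is about
-- the returned value.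

-- ===== PORT A =====
-- while not est_vide(src): empiler(dst, depiler(src))   (drain src onto dst, front first)
def pvDrain : List Int → List Int → List Int
  | [], dst => dst
  | x :: r, dst => pvDrain r (dst ++ [x])

-- hauteur_pile's first while loop: counts while draining P onto Q
def pvHautLoop : List Int → List Int → Int → Int × List Int
  | [], q, n => (n, q)
  | x :: r, q, n => pvHautLoop r (q ++ [x]) (n + 1)

-- hauteur_pile: count the elements, then drain them back
def pvHauteur (P : List Int) : Int × List Int :=
  let p := pvHautLoop P [] 0
  (p.1, pvDrain p.2 [])

-- 'while rang<=j: empiler(Q,depiler(P)); rang+=1' ([] case = IndexError, excluded by Pre_)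
def pvLoop1 : List Int → List Int → Int → Int → List Int × List Int
  | P, q, rang, j =>
    if rang ≤ j then
      match P with
      | [] => ([], q)
      | x :: r => pvLoop1 r (q ++ [x]) (rang + 1) j
    else (P, q)
  termination_by P _ _ _ => P.length

-- 'for i in range(long-1): empiler(Q,depiler(Q))' ([] case = IndexError, unreachable here)
def pvRot : List Int → Nat → List Int
  | q, 0 => q
  | [], _ + 1 => []
  | x :: r, k + 1 => pvRot (r ++ [x]) k

def retourner (P : List Int) (j : Int) : List Int :=
  -- 'assert j <= hauteur_pile(P)': inputs failing it raise and are excluded by Pre_retourner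
  let s := pvLoop1 P [] 1 j
  let T := pvDrain s.1 []
  let h := pvHauteur s.2
  let q3 := pvRot h.2 (h.1 - 1).toNat
  let p2 := pvDrain q3 []
  pvDrain T p2

-- ===== PORT B =====
def retourner_alt (P : List Int) (j : Int) : List Int :=
  -- same assert as A; then P[:j] = [P[j-1]] + P[:j-1] when j >= 2
  if 2 ≤ j then
    match PySem.List.pyGet? P (j - 1) with
    | some x => (x :: PySem.List.slice P none (some (j - 1))) ++ PySem.List.slice P (some j) none
    | none => P
  else P

-- ===== PRECONDITION & SPEC =====
-- exactly where A's (and B's) assert passes: j <= len(P); otherwise Python raises AssertionError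
def Pre_retourner (P : List Int) (j : Int) : Prop := j ≤ (P.length : Int)
instance (P : List Int) (j : Int) : Decidable (Pre_retourner P j) := by unfold Pre_retourner; infer_instance
def pvWitness_retourner : List Int × Int := ([1, 2, 3], 2)

def Spec_retourner (P : List Int) (j : Int) (out : List Int) : Prop := out = retourner_alt P j
instance (P : List Int) (j : Int) (out : List Int) : Decidable (Spec_retourner P j out) := by unfold Spec_retourner; infer_instance

-- ===== CLAIM (what is proved, stated in full; the proofs are below) =====
def Claim_equal_retourner : Prop := ∀ (P : List Int) (j : Int), Dom_retourner P j → Pre_retourner P j → Spec_retourner P j (retourner P j)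

-- ===== LEMMAS AND PROOFS =====

theorem pvDrain_eq (src dst : List Int) : pvDrain src dst = dst ++ src := by
  induction src generalizing dst with
  | nil => simp [pvDrain]
  | cons x r ih => simp [pvDrain, ih]

theorem pvHautLoop_eq (P q : List Int) (n : Int) :
    pvHautLoop P q n = (n + P.length, q ++ P) := by
  induction P generalizing q n with
  | nil => simp [pvHautLoop]
  | cons x r ih => simp [pvHautLoop, ih]; omega

theorem pvHauteur_eq (P : List Int) : pvHauteur P = ((P.length : Int), P) := by
  simp [pvHauteur, pvHautLoop_eq, pvDrain_eq]

theorem pvLoop1_eq (P q : List Int) (rang j : Int)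
    (h : (j + 1 - rang).toNat ≤ P.length) :
    pvLoop1 P q rang j = (P.drop (j + 1 - rang).toNat, q ++ P.take (j + 1 - rang).toNat) := by
  induction P generalizing q rang with
  | nil =>
    rw [pvLoop1]
    have : ¬ rang ≤ j := by simp at h; omega
    simp [this]
  | cons x r ih =>
    rw [pvLoop1]
    by_cases hr : rang ≤ j
    · simp only [if_pos hr]
      rw [ih (q ++ [x]) (rang + 1) (by simp at h ⊢; omega)]
      have hn : (j + 1 - rang).toNat = (j + 1 - (rang + 1)).toNat + 1 := by omega
      simp [hn]
    · simp only [if_neg hr]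
      have : (j + 1 - rang).toNat = 0 := by omega
      simp [this]

theorem pvRot_eq (k : Nat) (q : List Int) (h : k ≤ q.length) :
    pvRot q k = q.drop k ++ q.take k := by
  induction k generalizing q with
  | zero => simp [pvRot]
  | succ k ih =>
    match q with
    | [] => simp at h
    | x :: r =>
      simp only [pvRot]
      rw [ih (r ++ [x]) (by simp at h ⊢; omega)]
      have hk : k ≤ r.length := by simpa using h
      rw [List.drop_append_of_le_length hk, List.take_append_of_le_length hk]
      simp

-- A's value: first j elements rotated right by one (n := j.toNat), rest unchanged
theorem retourner_eq (P : List Int) (j : Int) (h : j ≤ (P.length : Int)) :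
    retourner P j =
      ((P.take j.toNat).drop (j.toNat - 1) ++ (P.take j.toNat).take (j.toNat - 1))
        ++ P.drop j.toNat := by
  have hn : j.toNat ≤ P.length := by omega
  have h1 : (j + 1 - 1).toNat = j.toNat := by omega
  unfold retourner
  rw [pvLoop1_eq P [] 1 j (by omega)]
  simp only [h1, List.nil_append, pvDrain_eq, pvHauteur_eq]
  have hlen : (P.take j.toNat).length = j.toNat := by simp; omega
  have hk : ((((P.take j.toNat).length : Int)) - 1).toNat = j.toNat - 1 := by
    rw [hlen]; omega
  rw [hk, pvRot_eq _ _ (by rw [hlen]; omega)]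

-- ===== VERDICT (by name: the statement is the Claim_ definition above) =====
theorem retourner_spec : Claim_equal_retourner := by
  intro P j _dom hpre
  unfold Spec_retourner retourner_alt
  rw [retourner_eq P j hpre]
  by_cases hj : 2 ≤ j
  · -- j ≥ 2: both give P[j-1] :: P[:j-1] ++ P[j:]
    have h0 : (0:Int) ≤ j - 1 := by omega
    have h1 : j - 1 < (P.length : Int) := by
      unfold Pre_retourner at hpre; omega
    have hjc : j = ((j.toNat : Nat) : Int) := by omega
    have hj1c : j - 1 = (((j.toNat - 1 : Nat)) : Int) := by omega
    have hs1 : PySem.List.slice P none (some (j - 1)) = P.take (j.toNat - 1) := by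
      rw [hj1c, PySem.List.slice_to_natCast]
    have hs2 : PySem.List.slice P (some j) none = P.drop j.toNat := by
      rw [hjc, PySem.List.slice_from_natCast]; congr 1
    have hlt : j.toNat - 1 < P.length := by omega
    have htd : (P.take j.toNat).drop (j.toNat - 1) = [P[j.toNat - 1]] := by
      rw [List.drop_take]
      have : j.toNat - (j.toNat - 1) = 1 := by omega
      rw [this]
      simp [List.take_one, List.head?_drop, List.getElem?_eq_getElem hlt]
    have htt : (P.take j.toNat).take (j.toNat - 1) = P.take (j.toNat - 1) := by
      rw [List.take_take]; congr 1; omega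
    have hgt : (j - 1).toNat = j.toNat - 1 := by omega
    simp only [if_pos hj, PySem.List.pyGet?_eq_some_getElem P h0 h1, hs1, hs2, hgt]
    rw [htd, htt]
    simp
  · -- j < 2: A's formula reduces to P, B returns P
    simp only [if_neg hj]
    have hcase : j.toNat = 0 ∨ j.toNat = 1 := by omega
    rcases hcase with h | h
    · simp [h]
    · have hj1 : j = 1 := by omega
      cases P with
      | nil =>
        unfold Pre_retourner at hpre
        simp [hj1] at hpre
      | cons y ys => simp [h]
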